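-- pv_equiv track=rewrite | github.com/ShanleyDemsich/AdventOfCode2022 | Day 8/MainEight.py | visible_row_trees
-- ===== SOURCE A (Python) =====
-- def visible_row_trees(row):
--     """Create a mask of visible trees looking across a row"""
--     mask_row = [True]
--     max_height = row[0]
--
--     for tree in row[1:]:
--         if tree_is_visible(tree, max_height):
--             # Set mask to true for visible tree
--             mask_row.append(True)
--             max_height = tree
--         else:
--             # Set mask to false for non-visible tree
--             mask_row.append(False)
--     return mask_row
--
-- def tree_is_visible(current_tree_height, comparison_tree_height):
--     """Verifies if the current tree is taller than, able to be seen, the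
--     comparing tree"""
--     return current_tree_height > comparison_tree_height
-- ===== SOURCE B (Python) =====
-- def visible_row_trees(row):
--     """Create a mask of visible trees looking across a row.
--     Two passes: build the running-maximum table, then compare each tree
--     with the maximum of everything before it."""
--     prefix = [row[0]]
--     for t in row[1:]:
--         prefix.append(t if t > prefix[-1] else prefix[-1])
--     return [True] + [x > m for x, m in zip(row[1:], prefix)]
-- ===== Notes on version B (the rewrite author's own statement) =====
-- stated objective: alternative
-- what changed: A's single fused scan carrying (mask, max_height) is split into two passes: first build the prefix running-maximum table, then emit True for index 0 and compare each later tree against the prefix maximum before it.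
import Mathlib
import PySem

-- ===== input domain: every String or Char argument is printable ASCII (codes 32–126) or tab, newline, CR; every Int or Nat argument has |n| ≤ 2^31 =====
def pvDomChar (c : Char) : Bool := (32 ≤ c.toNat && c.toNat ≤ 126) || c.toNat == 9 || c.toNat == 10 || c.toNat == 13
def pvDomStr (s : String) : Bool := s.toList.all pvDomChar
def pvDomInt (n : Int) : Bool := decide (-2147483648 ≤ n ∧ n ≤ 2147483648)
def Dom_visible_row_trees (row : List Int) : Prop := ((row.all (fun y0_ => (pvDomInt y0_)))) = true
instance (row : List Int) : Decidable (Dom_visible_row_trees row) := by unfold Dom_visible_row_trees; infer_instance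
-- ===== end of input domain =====

-- B splits A's fused scan into a prefix-running-maximum pass plus a comparison pass (objective: alternative decomposition).

-- ===== PORT A =====
-- A's loop over row[1:], carrying the growing mask and the running max_height.
def pvALoop : List Int → List Bool → Int → List Bool
  | [], mask, _ => mask
  | tree :: rest, mask, max_height =>
    if tree > max_height then pvALoop rest (mask ++ [true]) tree
    else pvALoop rest (mask ++ [false]) max_height

def visible_row_trees (row : List Int) : List Bool :=
  match row with
  | [] => []            -- unreachable under Pre_: Python A raises IndexError on row[0]
  | h :: t => pvALoop t [true] h

-- ===== PORT B =====
-- prefix.append(t if t > prefix[-1] else prefix[-1]) loop: running maxima over row[1:]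
def pvPrefixAux : List Int → Int → List Int
  | [], _ => []
  | t :: rest, m =>
    let m' := if t > m then t else m
    m' :: pvPrefixAux rest m'

def visible_row_trees_alt (row : List Int) : List Bool :=
  match row with
  | [] => []            -- unreachable under Pre_: Python B raises IndexError on row[0]
  | h :: t =>
    let pfx := h :: pvPrefixAux t h
    [true] ++ List.zipWith (fun x m => decide (x > m)) t pfx

-- ===== PRECONDITION & SPEC =====
-- Pre_ excludes only the empty row, on which both Pythons raise IndexError (row[0]).
def Pre_visible_row_trees (row : List Int) : Prop := row ≠ []
instance (row : List Int) : Decidable (Pre_visible_row_trees row) := by unfold Pre_visible_row_trees; infer_instance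
def pvWitness_visible_row_trees : List Int := [3, 1, 4, 1, 5]

def Spec_visible_row_trees (row : List Int) (out : List Bool) : Prop := out = visible_row_trees_alt row
instance (row : List Int) (out : List Bool) : Decidable (Spec_visible_row_trees row out) := by unfold Spec_visible_row_trees; infer_instance

-- ===== CLAIM (what is proved, stated in full; the proofs are below) =====
def Claim_equal_visible_row_trees : Prop := ∀ (row : List Int), Dom_visible_row_trees row → Pre_visible_row_trees row → Spec_visible_row_trees row (visible_row_trees row)

-- ===== LEMMAS AND PROOFS =====

-- A's accumulator loop equals the mask it appends, zipped out of B's prefix maxima.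
theorem pvALoop_eq (rest : List Int) (mask : List Bool) (m : Int) :
    pvALoop rest mask m =
      mask ++ List.zipWith (fun x mx => decide (x > mx)) rest (m :: pvPrefixAux rest m) := by
  induction rest generalizing mask m with
  | nil => simp [pvALoop]
  | cons x xs ih =>
    simp only [pvALoop, pvPrefixAux, List.zipWith]
    by_cases h : x > m
    · simp [h, ih, List.append_assoc]
    · simp [h, ih, List.append_assoc]

-- ===== VERDICT (by name: the statement is the Claim_ definition above) =====
theorem visible_row_trees_spec : Claim_equal_visible_row_trees := by
  intro row _ hpre
  unfold Spec_visible_row_trees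
  match row with
  | [] => exact absurd rfl hpre
  | h :: t =>
    simp [visible_row_trees, visible_row_trees_alt, pvALoop_eq]
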